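-- pv_equiv track=rewrite | github.com/ofirrubin/Networking-Final | Server/Data/file_generator.py | value_in_bytes
-- ===== SOURCE A (Python) =====
-- allowed = {'B': 'bytes', 'KB': 'kilobyte', 'MB': 'megabyte', 'GB': 'gigabyte'}
--
-- values = {'bytes': 1, 'kilobyte': 1000}
--
-- def value_in_bytes(unit, size):
--     if unit in allowed:
--         unit = allowed[unit]
--     elif unit not in allowed.values():
--         raise TypeError("Invalid unit")
--     if unit in values:
--         return values[unit] * size
--     else:
--         if 'giga' in unit:
--             return 1000 * value_in_bytes(unit.replace('giga', 'mega'), size)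
--         elif 'mega' in unit:
--             return 1000 * value_in_bytes(unit.replace('mega', 'kilo'), size)
--         elif 'kilo' in unit:
--             return 1000 * value_in_bytes(unit.replace('kilo', 'byte'), size)
-- ===== SOURCE B (Python) =====
-- _MULT = {'B': 1, 'bytes': 1,
--          'KB': 1000, 'kilobyte': 1000,
--          'MB': 1000000, 'megabyte': 1000000,
--          'GB': 1000000000, 'gigabyte': 1000000000}
--
-- def value_in_bytes(unit, size):
--     if unit not in _MULT:
--         raise TypeError("Invalid unit")
--     return _MULT[unit] * size
-- ===== Notes on version B (the rewrite author's own statement) =====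
-- stated objective: simpler
-- what changed: Replaces A's recursive prefix-stripping (alias dict + multiply-by-1000 per giga/mega/kilo replacement level) with one flat table mapping every accepted spelling directly to its integer byte multiplier.
import Mathlib
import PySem

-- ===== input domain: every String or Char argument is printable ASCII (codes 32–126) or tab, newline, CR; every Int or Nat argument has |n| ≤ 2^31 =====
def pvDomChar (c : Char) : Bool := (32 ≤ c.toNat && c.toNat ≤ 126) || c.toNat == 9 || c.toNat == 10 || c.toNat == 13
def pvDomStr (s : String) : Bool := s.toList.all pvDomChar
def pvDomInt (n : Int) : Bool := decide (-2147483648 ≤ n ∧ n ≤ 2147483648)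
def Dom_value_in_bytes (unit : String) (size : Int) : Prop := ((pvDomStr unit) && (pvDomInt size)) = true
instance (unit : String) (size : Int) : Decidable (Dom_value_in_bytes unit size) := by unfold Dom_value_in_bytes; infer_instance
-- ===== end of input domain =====

-- B replaces A's recursive prefix-stripping with one flat unit→multiplier table (objective: simpler).

-- ===== PORT A =====
-- allowed = {'B': 'bytes', 'KB': 'kilobyte', 'MB': 'megabyte', 'GB': 'gigabyte'}
def pvAllowed : PySem.Dict String String := PySem.Dict.ofList [("B", "bytes"), ("KB", "kilobyte"), ("MB", "megabyte"), ("GB", "gigabyte")]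

-- values = {'bytes': 1, 'kilobyte': 1000}
def pvValues : PySem.Dict String Int := PySem.Dict.ofList [("bytes", 1), ("kilobyte", 1000)]

-- A's recursion, with fuel only to make it total in Lean (depth ≤ 3 on accepted units;
-- fuel 0 / fall-through returns 0 exactly where Python raises/returns None — outside Pre_).
def pvGoA : Nat → String → Int → Int
  | 0, _, _ => 0
  | f + 1, unit, size =>
    -- if unit in allowed: unit = allowed[unit]
    let u := if PySem.Dict.contains pvAllowed unit
             then (PySem.Dict.get? pvAllowed unit).getD unit else unit
    -- elif unit not in allowed.values(): raise TypeError  (→ 0, outside Pre_)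
    if !PySem.Dict.contains pvAllowed unit
       && !(PySem.Dict.values pvAllowed).contains unit then 0
    else
      -- if unit in values: return values[unit] * size
      match PySem.Dict.get? pvValues u with
      | some v => v * size
      | none =>
        if PySem.Str.isIn "giga" u then
          1000 * pvGoA f (PySem.Str.replace u "giga" "mega") size
        else if PySem.Str.isIn "mega" u then
          1000 * pvGoA f (PySem.Str.replace u "mega" "kilo") size
        else if PySem.Str.isIn "kilo" u then
          1000 * pvGoA f (PySem.Str.replace u "kilo" "byte") size
        else 0  -- Python falls off the end (returns None) — unreachable inside Pre_

def value_in_bytes (unit : String) (size : Int) : Int := pvGoA 4 unit size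

-- ===== PORT B =====
-- _MULT: every accepted spelling mapped straight to its byte multiplier
def pvMult : PySem.Dict String Int := PySem.Dict.ofList [("B", 1), ("bytes", 1), ("KB", 1000), ("kilobyte", 1000),
   ("MB", 1000000), ("megabyte", 1000000),
   ("GB", 1000000000), ("gigabyte", 1000000000)]

def value_in_bytes_alt (unit : String) (size : Int) : Int :=
  match PySem.Dict.get? pvMult unit with
  | some m => m * size
  | none => 0  -- raise TypeError("Invalid unit") — outside Pre_

-- ===== PRECONDITION & SPEC =====
-- Pre_ excludes exactly the units on which Python A raises TypeError("Invalid unit")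
-- (and B raises the same); A returns normally precisely on these eight spellings.
def Pre_value_in_bytes (unit : String) (size : Int) : Prop :=
  unit = "B" ∨ unit = "KB" ∨ unit = "MB" ∨ unit = "GB" ∨
  unit = "bytes" ∨ unit = "kilobyte" ∨ unit = "megabyte" ∨ unit = "gigabyte"
instance (unit : String) (size : Int) : Decidable (Pre_value_in_bytes unit size) := by
  unfold Pre_value_in_bytes; infer_instance

def pvWitness_value_in_bytes : String × Int := ("MB", 3)

def Spec_value_in_bytes (unit : String) (size : Int) (out : Int) : Prop :=
  out = value_in_bytes_alt unit size
instance (unit : String) (size : Int) (out : Int) : Decidable (Spec_value_in_bytes unit size out) := by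
  unfold Spec_value_in_bytes; infer_instance

-- ===== CLAIM (what is proved, stated in full; the proofs are below) =====
def Claim_equal_value_in_bytes : Prop := ∀ (unit : String) (size : Int),
  Dom_value_in_bytes unit size → Pre_value_in_bytes unit size →
  Spec_value_in_bytes unit size (value_in_bytes unit size)

-- ===== LEMMAS AND PROOFS =====

-- ===== VERDICT (by name: the statement is the Claim_ definition above) =====
theorem value_in_bytes_spec : Claim_equal_value_in_bytes := by
  intro unit size _ hpre
  unfold Spec_value_in_bytes
  rcases hpre with h | h | h | h | h | h | h | h <;> subst h
  · rfl
  · rfl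
  · rw [show value_in_bytes "MB" size = 1000 * (1000 * size) from rfl,
        show value_in_bytes_alt "MB" size = 1000000 * size from rfl]; ring
  · rw [show value_in_bytes "GB" size = 1000 * (1000 * (1000 * size)) from rfl,
        show value_in_bytes_alt "GB" size = 1000000000 * size from rfl]; ring
  · rfl
  · rfl
  · rw [show value_in_bytes "megabyte" size = 1000 * (1000 * size) from rfl,
        show value_in_bytes_alt "megabyte" size = 1000000 * size from rfl]; ring
  · rw [show value_in_bytes "gigabyte" size = 1000 * (1000 * (1000 * size)) from rfl,
        show value_in_bytes_alt "gigabyte" size = 1000000000 * size from rfl]; ring
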